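-- pv_equiv track=rewrite | github.com/ZeroMin-K/Algorithm-Study | 프로그래머스/Level 1/모의고사-review.py | solution
-- ===== SOURCE A (Python) =====
-- def solution(answers):
--     # 각 수포자들이 찍는 방식에 대한 리스트  picks
--     picks = [
--         [],
--         [1, 2, 3, 4, 5],
--         [2, 1, 2, 3, 2, 4, 2, 5],
--         [3, 3, 1, 1, 2, 2, 4, 4, 5, 5]
--     ]
--
--     # 수포자가 맞힌 문제 개수 리스트 길이4 , 0으로초기화 totals
--     totals = [0] * 4
--
--     # 인덱스 i를 0부터 answers의 길이-1까지 반복하면서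
--     for i in range(len(answers)):
--         # picks 리스트 인덱스 j - 1부터 반복하면서 3까지 진행
--         for j in range(1, 4):
--             # picks[j] - 1, 2, 3은 각 수포자 리스트
--             # answers[i]와 picks[j][i % len(picks[j])] 가 같으면
--             if answers[i] == picks[j][i % len(picks[j])]:
--                 # totals[j] 에 1 추가
--                 totals[j] += 1
--
--     # 수포자가 맞힌 문제 리스트최대값
--     # 수포자 문제 개수 리스트 하나씩 확인하며 인덱스 i는 1부터 3까지
--         # 문제 리스트 최대값과 같으면
--             # 결과리스트에 i를 append
--     answer = [i for i in range(1, 4) if totals[i] == max(totals)]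
--
--
--     return answer
-- ===== SOURCE B (Python) =====
-- def solution(answers):
--     # Histogram algorithm: 40 = lcm(5, 8, 10), so position i behaves like i % 40
--     # for all three patterns. One pass builds a counter of (i % 40, answer) pairs;
--     # each score is then a sum of 40 table lookups, with no per-element comparison.
--     hist = {}
--     for i, a in enumerate(answers):
--         key = (i % 40, a)
--         hist[key] = hist.get(key, 0) + 1
--     patterns = [[1, 2, 3, 4, 5], [2, 1, 2, 3, 2, 4, 2, 5], [3, 3, 1, 1, 2, 2, 4, 4, 5, 5]]
--     scores = [sum(hist.get((k, p[k % len(p)]), 0) for k in range(40)) for p in patterns]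
--     best = max(scores)
--     return [i + 1 for i, s in enumerate(scores) if s == best]
-- ===== Notes on version B (the rewrite author's own statement) =====
-- stated objective: alternative
-- what changed: Replaces A's per-element modular comparison against each pattern by a histogram algorithm: one pass builds a dict counting (i % 40, answer) pairs (40 = lcm of the pattern lengths), then each score is a sum of 40 dict lookups independent of n, followed by max and an enumerate-based selection.
import Mathlib
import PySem

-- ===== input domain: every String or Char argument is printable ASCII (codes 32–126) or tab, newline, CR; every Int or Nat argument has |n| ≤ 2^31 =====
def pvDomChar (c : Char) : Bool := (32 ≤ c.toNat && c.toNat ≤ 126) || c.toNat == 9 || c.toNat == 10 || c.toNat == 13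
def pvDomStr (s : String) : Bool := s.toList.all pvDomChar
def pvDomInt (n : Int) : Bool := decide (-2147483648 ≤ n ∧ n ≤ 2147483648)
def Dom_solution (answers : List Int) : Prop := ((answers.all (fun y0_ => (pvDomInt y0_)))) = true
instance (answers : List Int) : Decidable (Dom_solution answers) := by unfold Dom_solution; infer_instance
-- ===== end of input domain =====

-- B replaces A's per-element modular pattern comparison by a histogram: one pass counts (i % 40, answer)
-- pairs (40 = lcm of the pattern lengths), then each score is a sum of 40 dict lookups (same cost class).

-- ===== PORT A =====
-- literal port of A: picks table, totals accumulator updated over range(len(answers)) × range(1,4),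
-- then the comprehension over range(1,4) comparing against max(totals) (max of the 4-element totals: never none)
def solution (answers : List Int) : List Int :=
  let picks : List (List Int) :=
    [[], [1, 2, 3, 4, 5], [2, 1, 2, 3, 2, 4, 2, 5], [3, 3, 1, 1, 2, 2, 4, 4, 5, 5]]
  let totals : List Int :=
    (PySem.List.pyRange 0 (answers.length : Int) 1).foldl (fun totals i =>
      (PySem.List.pyRange 1 4 1).foldl (fun totals j =>
        let pj := PySem.List.pyGetD picks j []
        if PySem.List.pyGetD answers i 0 = PySem.List.pyGetD pj (PySem.Int.mod i (pj.length : Int)) 0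
        then totals.set j.toNat (PySem.List.pyGetD totals j 0 + 1)
        else totals) totals)
      [0, 0, 0, 0]
  match PySem.List.max? totals (fun y => y) with
  | none => []   -- unreachable: totals has 4 elements
  | some m => (PySem.List.pyRange 1 4 1).filter (fun i => PySem.List.pyGetD totals i 0 = m)

-- ===== PORT B =====
-- hist = {} ; for i, a in enumerate(answers): key = (i % 40, a); hist[key] = hist.get(key, 0) + 1
-- scores = [sum(hist.get((k, p[k % len(p)]), 0) for k in range(40)) for p in patterns]
-- best = max(scores) ; [i + 1 for i, s in enumerate(scores) if s == best]
def solution_alt (answers : List Int) : List Int :=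
  let hist : PySem.Dict (Int × Int) Int :=
    (PySem.List.enumerate answers 0).foldl
      (fun h p => h.insert (PySem.Int.mod p.1 40, p.2) (h.getD (PySem.Int.mod p.1 40, p.2) 0 + 1))
      PySem.Dict.empty
  let patterns : List (List Int) :=
    [[1, 2, 3, 4, 5], [2, 1, 2, 3, 2, 4, 2, 5], [3, 3, 1, 1, 2, 2, 4, 4, 5, 5]]
  let scores : List Int := patterns.map (fun p =>
    ((PySem.List.pyRange 0 40 1).map (fun k =>
      hist.getD (k, PySem.List.pyGetD p (PySem.Int.mod k (p.length : Int)) 0) 0)).sum)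
  match PySem.List.max? scores (fun y => y) with
  | none => []   -- unreachable: scores has 3 elements
  | some best =>
    ((PySem.List.enumerate scores 0).filter (fun q => q.2 = best)).map (fun q => q.1 + 1)

-- ===== PRECONDITION & SPEC =====
def Spec_solution (answers : List Int) (out : List Int) : Prop := out = solution_alt answers
instance (answers : List Int) (out : List Int) : Decidable (Spec_solution answers out) := by unfold Spec_solution; infer_instance

-- ===== CLAIM (what is proved, stated in full; the proofs are below) =====
def Claim_equal_solution : Prop := ∀ (answers : List Int), Dom_solution answers → Spec_solution answers (solution answers)

-- ===== LEMMAS AND PROOFS =====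

def pvP1 : List Int := [1, 2, 3, 4, 5]
def pvP2 : List Int := [2, 1, 2, 3, 2, 4, 2, 5]
def pvP3 : List Int := [3, 3, 1, 1, 2, 2, 4, 4, 5, 5]

-- number of positions k of xs with xs[k] = pat[(s+k) % len pat]  (cycle match count from offset s)
def pvCnt (pat : List Int) : Nat → List Int → Int
  | _, [] => 0
  | s, x :: xs => (if x = PySem.List.pyGetD pat ((s % pat.length : Nat) : Int) 0 then 1 else 0) + pvCnt pat (s + 1) xs

theorem pvCnt_nonneg (pat : List Int) (s : Nat) (xs : List Int) : 0 ≤ pvCnt pat s xs := by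
  induction xs generalizing s with
  | nil => simp [pvCnt]
  | cons x xs ih =>
    have := ih (s + 1)
    simp only [pvCnt]
    split <;> omega

-- the key list B's histogram counts: ((s+j) % 40, x_j) over the elements of xs
def pvKeys : Nat → List Int → List (Int × Int)
  | _, [] => []
  | s, x :: xs => (((s % 40 : Nat) : Int), x) :: pvKeys (s + 1) xs

-- B's enumerate-fold key list is pvKeys
theorem pvKeys_eq (xs : List Int) : ∀ (s : Nat),
    (PySem.List.enumerate xs (s : Int)).map (fun p => (PySem.Int.mod p.1 40, p.2)) = pvKeys s xs := by
  induction xs with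
  | nil => intro s; simp [PySem.List.enumerate_nil, pvKeys]
  | cons x xs ih =>
    intro s
    rw [PySem.List.enumerate_cons, List.map_cons]
    have : ((s : Int) + 1) = ((s + 1 : Nat) : Int) := by push_cast; ring
    rw [this, ih (s + 1)]
    simp [pvKeys]

-- (pyRange 0 40 1).count of a small nat is 1
theorem pvCount_range (m : Nat) (hm : m < 40) :
    (PySem.List.pyRange 0 40 1).count ((m : Nat) : Int) = 1 := by
  interval_cases m <;> decide

-- point sum: summing the indicator of the single matching slot over range(40)
theorem pvPointSum (f : Int → Int) (m : Nat) (hm : m < 40) (x : Int) :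
    ((PySem.List.pyRange 0 40 1).map (fun k =>
      if ((((m : Nat) : Int), x) == (k, f k)) = true then (1 : Int) else 0)).sum
    = if x = f ((m : Nat) : Int) then 1 else 0 := by
  rw [PySem.List.sum_map_ite_one_zero]
  by_cases hx : x = f ((m : Nat) : Int)
  · rw [if_pos hx]
    have hcong : (PySem.List.pyRange 0 40 1).countP (fun k => (((m : Nat) : Int), x) == (k, f k))
        = (PySem.List.pyRange 0 40 1).countP (fun k => k == ((m : Nat) : Int)) := by
      apply List.countP_congr
      intro k _
      simp only [beq_iff_eq, Prod.mk.injEq]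
      constructor
      · intro h; exact h.1.symm
      · intro h; exact ⟨h.symm, by rw [h, ← hx]⟩
    rw [hcong]
    have : (PySem.List.pyRange 0 40 1).countP (fun k => k == ((m : Nat) : Int))
        = (PySem.List.pyRange 0 40 1).count ((m : Nat) : Int) := rfl
    rw [this, pvCount_range m hm]
    norm_num
  · rw [if_neg hx]
    have : (PySem.List.pyRange 0 40 1).countP (fun k => (((m : Nat) : Int), x) == (k, f k)) = 0 := by
      apply List.countP_eq_zero.mpr
      intro k _
      simp only [beq_iff_eq, Prod.mk.injEq, not_and]
      intro hk hfx
      exact hx (by rw [hk, ← hfx])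
    rw [this]
    rfl

-- summing histogram counts of (k, pat[k % len]) over range(40) gives the cycle-match count,
-- for any pattern whose length divides 40
theorem pvHistSum (pat : List Int) (hdvd : pat.length ∣ 40) :
    ∀ (xs : List Int) (s : Nat),
      ((PySem.List.pyRange 0 40 1).map (fun k =>
        (((pvKeys s xs).count (k, PySem.List.pyGetD pat (PySem.Int.mod k (pat.length : Int)) 0) : Nat) : Int))).sum
      = pvCnt pat s xs := by
  intro xs
  induction xs with
  | nil =>
    intro s
    simp [pvKeys, pvCnt]
  | cons x xs ih =>
    intro s
    have hm : s % 40 < 40 := Nat.mod_lt s (by norm_num)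
    simp only [pvKeys, pvCnt]
    have hsplit : ∀ k : Int,
        ((((((s % 40 : Nat) : Int), x) :: pvKeys (s + 1) xs).count
            (k, PySem.List.pyGetD pat (PySem.Int.mod k (pat.length : Int)) 0) : Nat) : Int)
        = (((pvKeys (s + 1) xs).count (k, PySem.List.pyGetD pat (PySem.Int.mod k (pat.length : Int)) 0) : Nat) : Int)
          + (if ((((s % 40 : Nat) : Int), x)
              == (k, PySem.List.pyGetD pat (PySem.Int.mod k (pat.length : Int)) 0)) = true then (1 : Int) else 0) := by
      intro k
      rw [List.count_cons, Nat.cast_add]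
      congr 1
      split_ifs <;> simp
    have hmap : (PySem.List.pyRange 0 40 1).map (fun k =>
        ((((((s % 40 : Nat) : Int), x) :: pvKeys (s + 1) xs).count
            (k, PySem.List.pyGetD pat (PySem.Int.mod k (pat.length : Int)) 0) : Nat) : Int))
        = (PySem.List.pyRange 0 40 1).map (fun k =>
            (((pvKeys (s + 1) xs).count (k, PySem.List.pyGetD pat (PySem.Int.mod k (pat.length : Int)) 0) : Nat) : Int)
          + (if ((((s % 40 : Nat) : Int), x)
              == (k, PySem.List.pyGetD pat (PySem.Int.mod k (pat.length : Int)) 0)) = true then (1 : Int) else 0)) := by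
      apply List.map_congr_left
      intro k _
      exact hsplit k
    rw [hmap, PySem.List.sum_map_add_int, ih (s + 1),
        pvPointSum (fun k => PySem.List.pyGetD pat (PySem.Int.mod k (pat.length : Int)) 0) (s % 40) hm x]
    have hpat : PySem.List.pyGetD pat (PySem.Int.mod (((s % 40 : Nat) : Int)) (pat.length : Int)) 0
        = PySem.List.pyGetD pat ((s % pat.length : Nat) : Int) 0 := by
      rw [PySem.Int.mod_natCast (s % 40) pat.length, Nat.mod_mod_of_dvd s hdvd]
    rw [hpat]
    ring

-- A's loop invariant: processing enumerate xs s from state [t0,t1,t2,t3] adds the three cycle counts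
theorem pvLoopInv (xs : List Int) : ∀ (s : Nat) (t0 t1 t2 t3 : Int),
    (PySem.List.enumerate xs (s : Int)).foldl (fun totals p =>
      (PySem.List.pyRange 1 4 1).foldl (fun totals j =>
        if p.2 = PySem.List.pyGetD (PySem.List.pyGetD
            ([[], [1, 2, 3, 4, 5], [2, 1, 2, 3, 2, 4, 2, 5], [3, 3, 1, 1, 2, 2, 4, 4, 5, 5]] : List (List Int)) j [])
            (PySem.Int.mod p.1 ((PySem.List.pyGetD
            ([[], [1, 2, 3, 4, 5], [2, 1, 2, 3, 2, 4, 2, 5], [3, 3, 1, 1, 2, 2, 4, 4, 5, 5]] : List (List Int)) j []).length : Int)) 0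
        then totals.set j.toNat (PySem.List.pyGetD totals j 0 + 1)
        else totals) totals) [t0, t1, t2, t3]
    = [t0, t1 + pvCnt pvP1 s xs, t2 + pvCnt pvP2 s xs, t3 + pvCnt pvP3 s xs] := by
  induction xs with
  | nil =>
    intro s t0 t1 t2 t3
    simp [PySem.List.enumerate_nil, pvCnt]
  | cons x xs ih =>
    intro s t0 t1 t2 t3
    rw [PySem.List.enumerate_cons, List.foldl_cons]
    have hr : PySem.List.pyRange 1 4 1 = [1, 2, 3] := by decide
    have m5 := PySem.Int.mod_natCast s 5
    have m8 := PySem.Int.mod_natCast s 8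
    have m10 := PySem.Int.mod_natCast s 10
    have hstep :
        (PySem.List.pyRange 1 4 1).foldl (fun totals j =>
          if (((s : Int), x) : Int × Int).2 = PySem.List.pyGetD (PySem.List.pyGetD
              ([[], [1, 2, 3, 4, 5], [2, 1, 2, 3, 2, 4, 2, 5], [3, 3, 1, 1, 2, 2, 4, 4, 5, 5]] : List (List Int)) j [])
              (PySem.Int.mod (((s : Int), x) : Int × Int).1 ((PySem.List.pyGetD
              ([[], [1, 2, 3, 4, 5], [2, 1, 2, 3, 2, 4, 2, 5], [3, 3, 1, 1, 2, 2, 4, 4, 5, 5]] : List (List Int)) j []).length : Int)) 0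
          then totals.set j.toNat (PySem.List.pyGetD totals j 0 + 1)
          else totals) [t0, t1, t2, t3]
        = [t0,
           t1 + (if x = PySem.List.pyGetD pvP1 ((s % pvP1.length : Nat) : Int) 0 then 1 else 0),
           t2 + (if x = PySem.List.pyGetD pvP2 ((s % pvP2.length : Nat) : Int) 0 then 1 else 0),
           t3 + (if x = PySem.List.pyGetD pvP3 ((s % pvP3.length : Nat) : Int) 0 then 1 else 0)] := by
      rw [hr]
      have g1 : PySem.List.pyGetD
          [[], [1, 2, 3, 4, 5], [2, 1, 2, 3, 2, 4, 2, 5], [3, 3, 1, 1, 2, 2, 4, 4, 5, 5]]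
          (1 : Int) ([] : List Int) = [1, 2, 3, 4, 5] := by decide
      have g2 : PySem.List.pyGetD
          [[], [1, 2, 3, 4, 5], [2, 1, 2, 3, 2, 4, 2, 5], [3, 3, 1, 1, 2, 2, 4, 4, 5, 5]]
          (2 : Int) ([] : List Int) = [2, 1, 2, 3, 2, 4, 2, 5] := by decide
      have g3 : PySem.List.pyGetD
          [[], [1, 2, 3, 4, 5], [2, 1, 2, 3, 2, 4, 2, 5], [3, 3, 1, 1, 2, 2, 4, 4, 5, 5]]
          (3 : Int) ([] : List Int) = [3, 3, 1, 1, 2, 2, 4, 4, 5, 5] := by decide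
      have l1 : List.length ([1, 2, 3, 4, 5] : List Int) = 5 := rfl
      have l2 : List.length ([2, 1, 2, 3, 2, 4, 2, 5] : List Int) = 8 := rfl
      have l3 : List.length ([3, 3, 1, 1, 2, 2, 4, 4, 5, 5] : List Int) = 10 := rfl
      simp only [List.foldl_cons, List.foldl_nil, g1, g2, g3, l1, l2, l3, m5, m8, m10,
        pvP1, pvP2, pvP3]
      split_ifs <;> simp [PySem.List.pyGetD, List.set,
        show Int.toNat 1 = 1 from rfl, show Int.toNat 2 = 2 from rfl, show Int.toNat 3 = 3 from rfl]
    rw [hstep]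
    rw [show ((s : Int) + 1) = ((s + 1 : Nat) : Int) by push_cast; ring]
    rw [ih (s + 1)]
    simp only [pvCnt]
    simp [add_assoc]

-- ===== VERDICT (by name: the statement is the Claim_ definition above) =====
theorem solution_spec : Claim_equal_solution := by
  intro answers _
  unfold Spec_solution
  simp only [solution, solution_alt]
  -- A side: rewrite the index fold to an enumerate fold, then apply the loop invariant
  have he := PySem.List.enumerate_eq_map_pyRange (xs := answers) (d := (0 : Int))
  have hfold :
      (PySem.List.pyRange 0 (answers.length : Int) 1).foldl (fun totals i =>
        (PySem.List.pyRange 1 4 1).foldl (fun totals j =>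
          if PySem.List.pyGetD answers i 0 = PySem.List.pyGetD (PySem.List.pyGetD
              ([[], [1, 2, 3, 4, 5], [2, 1, 2, 3, 2, 4, 2, 5], [3, 3, 1, 1, 2, 2, 4, 4, 5, 5]] : List (List Int)) j [])
              (PySem.Int.mod i ((PySem.List.pyGetD
              ([[], [1, 2, 3, 4, 5], [2, 1, 2, 3, 2, 4, 2, 5], [3, 3, 1, 1, 2, 2, 4, 4, 5, 5]] : List (List Int)) j []).length : Int)) 0
          then totals.set j.toNat (PySem.List.pyGetD totals j 0 + 1)
          else totals) totals) ([0, 0, 0, 0] : List Int)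
      = (PySem.List.enumerate answers ((0 : Nat) : Int)).foldl (fun totals p =>
        (PySem.List.pyRange 1 4 1).foldl (fun totals j =>
          if p.2 = PySem.List.pyGetD (PySem.List.pyGetD
              ([[], [1, 2, 3, 4, 5], [2, 1, 2, 3, 2, 4, 2, 5], [3, 3, 1, 1, 2, 2, 4, 4, 5, 5]] : List (List Int)) j [])
              (PySem.Int.mod p.1 ((PySem.List.pyGetD
              ([[], [1, 2, 3, 4, 5], [2, 1, 2, 3, 2, 4, 2, 5], [3, 3, 1, 1, 2, 2, 4, 4, 5, 5]] : List (List Int)) j []).length : Int)) 0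
          then totals.set j.toNat (PySem.List.pyGetD totals j 0 + 1)
          else totals) totals) ([0, 0, 0, 0] : List Int) := by
    rw [show (((0 : Nat) : Int)) = (0 : Int) by norm_num, he, List.foldl_map]
    rfl
  rw [hfold, pvLoopInv answers 0 0 0 0 0]
  -- B side: the histogram fold is a counter over pvKeys, each score is a pvCnt
  have hhist : (PySem.List.enumerate answers 0).foldl
      (fun h p => h.insert (PySem.Int.mod p.1 40, p.2) (h.getD (PySem.Int.mod p.1 40, p.2) 0 + 1))
      (PySem.Dict.empty : PySem.Dict (Int × Int) Int)
      = (pvKeys 0 answers).foldl (fun d x => d.insert x (d.getD x 0 + 1)) PySem.Dict.empty := by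
    rw [← pvKeys_eq answers 0, List.foldl_map]
    norm_num
  have hget : ∀ key : Int × Int,
      (((pvKeys 0 answers).foldl (fun d x => d.insert x (d.getD x 0 + 1))
        (PySem.Dict.empty : PySem.Dict (Int × Int) Int)).getD key 0)
      = (((pvKeys 0 answers).count key : Nat) : Int) := by
    intro key
    rw [PySem.Dict.getD_foldl_insert_add_one, PySem.Dict.getD_empty]
    ring
  have hscore : ∀ pat : List Int, pat.length ∣ 40 →
      ((PySem.List.pyRange 0 40 1).map (fun k =>
        (((pvKeys 0 answers).foldl (fun d x => d.insert x (d.getD x 0 + 1))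
          (PySem.Dict.empty : PySem.Dict (Int × Int) Int)).getD
          (k, PySem.List.pyGetD pat (PySem.Int.mod k (pat.length : Int)) 0) 0))).sum
      = pvCnt pat 0 answers := by
    intro pat hdvd
    rw [← pvHistSum pat hdvd answers 0]
    congr 1
    apply List.map_congr_left
    intro k _
    exact hget _
  simp only [hhist, List.map_cons, List.map_nil]
  rw [hscore [1, 2, 3, 4, 5] (by decide), hscore [2, 1, 2, 3, 2, 4, 2, 5] (by decide),
      hscore [3, 3, 1, 1, 2, 2, 4, 4, 5, 5] (by decide)]
  have e1 : pvCnt [1, 2, 3, 4, 5] 0 answers = pvCnt pvP1 0 answers := rfl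
  have e2 : pvCnt [2, 1, 2, 3, 2, 4, 2, 5] 0 answers = pvCnt pvP2 0 answers := rfl
  have e3 : pvCnt [3, 3, 1, 1, 2, 2, 4, 4, 5, 5] 0 answers = pvCnt pvP3 0 answers := rfl
  rw [e1, e2, e3]
  set c1 := pvCnt pvP1 0 answers with hc1
  set c2 := pvCnt pvP2 0 answers with hc2
  set c3 := pvCnt pvP3 0 answers with hc3
  have h1 : 0 ≤ c1 := pvCnt_nonneg _ _ _
  have hmaxA : PySem.List.max? [(0 : Int), 0 + c1, 0 + c2, 0 + c3] (fun y => y)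
      = some (max c1 (max c2 c3)) := by
    rw [PySem.List.max?_id_cons]
    simp only [List.foldl_cons, List.foldl_nil, zero_add]
    congr 1
    rw [max_comm 0 c1, max_assoc, max_assoc]
    omega
  have hmaxB : PySem.List.max? [c1, c2, c3] (fun y => y) = some (max c1 (max c2 c3)) := by
    rw [PySem.List.max?_id_cons]
    simp [max_assoc]
  rw [hmaxA, hmaxB]
  set M := max c1 (max c2 c3) with hM
  simp only [zero_add]
  have hen : PySem.List.enumerate [c1, c2, c3] 0 = [(0, c1), (1, c2), (2, c3)] := by
    simp [PySem.List.enumerate_cons, PySem.List.enumerate_nil]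
  rw [hen]
  have hr : PySem.List.pyRange 1 4 1 = [1, 2, 3] := by decide
  rw [hr]
  by_cases g1 : c1 = M <;> by_cases g2 : c2 = M <;> by_cases g3 : c3 = M <;>
    simp [List.filter, List.map, PySem.List.pyGetD, g1, g2, g3,
      show Int.toNat 1 = 1 from rfl, show Int.toNat 2 = 2 from rfl, show Int.toNat 3 = 3 from rfl]
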